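-- pv_equiv track=rewrite | github.com/pepsiyoung/python-tools | src/arithmetic/find_store_pair.py | questionA
-- ===== SOURCE A (Python) =====
-- def questionA(arr, d):
--     """
--     找一对石头 暴力求解
--     时间复杂度:O(N^2)
--     空间复杂度:O(1)
--     :param arr:
--     :param d:
--     :return:
--     """
--     if d < 0:
--         return []
--     arr_length = len(arr)
--     for i in range(arr_length):
--         for j in range(i + 1, arr_length):
--             if abs(arr[i] - arr[j]) == d:
--                 return [(i, j)]
--     return []
-- ===== SOURCE B (Python) =====
-- def questionA(arr, d):
--     """O(N) single pass: scan right-to-left keeping, for each value, the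
--     nearest (smallest) index to the right; the pair recorded at the smallest
--     matching i, with the minimal j, is the answer."""
--     if d < 0:
--         return []
--     nearest = {}  # value -> smallest index strictly to the right of position i
--     result = []
--     for i in range(len(arr) - 1, -1, -1):
--         v = arr[i]
--         cands = [nearest[t] for t in (v + d, v - d) if t in nearest]
--         if cands:
--             result = [(i, min(cands))]
--         nearest[v] = i
--     return result
-- ===== Notes on version B (the rewrite author's own statement) =====
-- stated objective: faster
-- what changed: Replaced the O(N^2) nested index scan with a single right-to-left pass that keeps a hash map from value to its nearest index on the right, so the minimal j for each i is a dictionary lookup instead of an inner loop.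
import Mathlib
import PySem

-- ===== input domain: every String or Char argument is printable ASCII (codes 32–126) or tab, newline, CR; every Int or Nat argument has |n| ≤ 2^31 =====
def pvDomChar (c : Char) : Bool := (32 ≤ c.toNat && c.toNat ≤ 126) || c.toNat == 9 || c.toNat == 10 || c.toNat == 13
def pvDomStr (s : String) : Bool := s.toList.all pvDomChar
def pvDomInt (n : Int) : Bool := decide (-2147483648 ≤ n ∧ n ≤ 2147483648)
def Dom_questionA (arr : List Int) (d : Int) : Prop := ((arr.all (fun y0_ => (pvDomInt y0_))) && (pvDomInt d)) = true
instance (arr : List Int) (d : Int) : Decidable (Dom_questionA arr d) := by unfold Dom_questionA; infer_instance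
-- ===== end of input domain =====

-- B replaces A's O(N^2) nested scan by one right-to-left pass with a value -> nearest-right-index dictionary (objective: faster).

-- ===== PORT A =====
def pyAbsInt (x : Int) : Int := if x < 0 then -x else x

def questionA (arr : List Int) (d : Int) : List (Int × Int) :=
  if d < 0 then []
  else
    let n := PySem.List.len arr
    match (PySem.List.pyRange 0 n 1).findSome? (fun i =>
        (PySem.List.pyRange (i + 1) n 1).findSome? (fun j =>
          if pyAbsInt (PySem.List.pyGetD arr i 0 - PySem.List.pyGetD arr j 0) = d
          then some (i, j) else none)) with
    | some p => [p]
    | none => []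

-- ===== PORT B =====
def stepB (arr : List Int) (d : Int)
    (st : PySem.Dict Int Int × List (Int × Int)) (i : Int) :
    PySem.Dict Int Int × List (Int × Int) :=
  let v := PySem.List.pyGetD arr i 0
  let cands := ([v + d, v - d].filterMap (fun t => st.1.get? t))
  let res := match cands.min? with
    | some j => [(i, j)]
    | none => st.2
  (st.1.insert v i, res)

def questionA_alt (arr : List Int) (d : Int) : List (Int × Int) :=
  if d < 0 then []
  else
    let n := PySem.List.len arr
    ((PySem.List.pyRange (n - 1) (-1) (-1)).foldl (stepB arr d)
      (PySem.Dict.empty, [])).2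

-- ===== PRECONDITION & SPEC =====
def Spec_questionA (arr : List Int) (d : Int) (out : List (Int × Int)) : Prop := out = questionA_alt arr d
instance (arr : List Int) (d : Int) (out : List (Int × Int)) : Decidable (Spec_questionA arr d out) := by unfold Spec_questionA; infer_instance

-- ===== CLAIM (what is proved, stated in full; the proofs are below) =====
def Claim_equal_questionA : Prop := ∀ (arr : List Int) (d : Int), Dom_questionA arr d → Spec_questionA arr d (questionA arr d)

-- ===== LEMMAS AND PROOFS =====

-- A's inner loop (the body questionA applies at each outer index i).
def innerF (arr : List Int) (d n : Int) (i : Int) : Option (Int × Int) :=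
  (PySem.List.pyRange (i + 1) n 1).findSome? (fun j =>
    if pyAbsInt (PySem.List.pyGetD arr i 0 - PySem.List.pyGetD arr j 0) = d
    then some (i, j) else none)

def minOpt : Option Int → Option Int → Option Int
  | none, o => o
  | some a, none => some a
  | some a, some b => some (min a b)

lemma find?_or_minOpt (p q : Int → Bool) :
    ∀ (R : List Int), R.Pairwise (· < ·) →
    R.find? (fun j => p j || q j) = minOpt (R.find? p) (R.find? q) := by
  intro R
  induction R with
  | nil => intro _; rfl
  | cons x R ih =>
    intro hpw
    have hlt : ∀ y ∈ R, x < y := (List.pairwise_cons.mp hpw).1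
    have htail := ih (List.pairwise_cons.mp hpw).2
    cases hp : p x with
    | true =>
      cases hq : q x with
      | true => simp [hp, hq, minOpt]
      | false =>
        simp only [List.find?_cons, hp, hq, Bool.true_or]
        cases hfq : R.find? q with
        | none => simp [minOpt]
        | some y =>
          have hxy : x < y := hlt y (List.mem_of_find?_eq_some hfq)
          simp only [minOpt]
          rw [min_eq_left (le_of_lt hxy)]
    | false =>
      cases hq : q x with
      | true =>
        simp only [List.find?_cons, hp, hq, Bool.false_or]
        cases hfp : R.find? p with
        | none => simp [minOpt]
        | some y =>
          have hxy : x < y := hlt y (List.mem_of_find?_eq_some hfp)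
          simp only [minOpt]
          rw [min_eq_right (le_of_lt hxy)]
      | false =>
        simp only [List.find?_cons, hp, hq, Bool.false_or]
        exact htail

lemma findSome?_if_eq_find?_map (c : Int → Prop) [DecidablePred c] (g : Int → Int × Int) :
    ∀ (R : List Int),
    R.findSome? (fun j => if c j then some (g j) else none)
      = (R.find? (fun j => decide (c j))).map g := by
  intro R
  induction R with
  | nil => rfl
  | cons x R ih =>
    by_cases hc : c x
    · simp [hc]
    · simp [hc, ih]

lemma abs_cond (v w d : Int) (hd : 0 ≤ d) :
    (decide (pyAbsInt (v - w) = d)) = ((w == v + d) || (w == v - d)) := by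
  have h : pyAbsInt (v - w) = d ↔ (w = v + d ∨ w = v - d) := by
    unfold pyAbsInt
    split <;> omega
  by_cases h1 : w = v + d
  · simp [h1]
    unfold pyAbsInt
    split <;> omega
  · by_cases h2 : w = v - d
    · simp [h2]
      unfold pyAbsInt
      split <;> omega
    · simp [h, h1, h2]

-- main invariant: folding B's step over the suffix [i, n) from the right yields
-- (the nearest-index dictionary for that suffix, A's answer restricted to outer indices ≥ i)
lemma invarB (arr : List Int) (d : Int) (hd : 0 ≤ d) :
    ∀ (k : Nat) (i : Int), 0 ≤ i → ((arr.length : Int) - i).toNat = k →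
    (∀ w : Int,
      ((PySem.List.pyRange i (arr.length : Int) 1).foldr
          (fun j st => stepB arr d st j) (PySem.Dict.empty, [])).1.get? w
        = (PySem.List.pyRange i (arr.length : Int) 1).find?
            (fun j => PySem.List.pyGetD arr j 0 == w))
    ∧ ((PySem.List.pyRange i (arr.length : Int) 1).foldr
          (fun j st => stepB arr d st j) (PySem.Dict.empty, [])).2
        = (match (PySem.List.pyRange i (arr.length : Int) 1).findSome?
              (innerF arr d (arr.length : Int)) with
           | some p => [p]
           | none => []) := by
  intro k
  induction k with
  | zero =>
    intro i hi hk
    have hni : (arr.length : Int) ≤ i := by omega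
    rw [PySem.List.pyRange_one_eq_nil hni]
    simp [PySem.Dict.get?_empty]
  | succ k ih =>
    intro i hi hk
    have hin : i < (arr.length : Int) := by omega
    obtain ⟨hdict, hres⟩ := ih (i + 1) (by omega) (by omega)
    rw [PySem.List.pyRange_one_cons hin]
    simp only [List.foldr_cons]
    set st' := (PySem.List.pyRange (i + 1) (arr.length : Int) 1).foldr
        (fun j st => stepB arr d st j) (PySem.Dict.empty, ([] : List (Int × Int))) with hst'
    -- candidate minimum = first matching index in the suffix range
    have hcand : (([PySem.List.pyGetD arr i 0 + d, PySem.List.pyGetD arr i 0 - d].filterMap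
          (fun t => st'.1.get? t)).min?)
        = (PySem.List.pyRange (i + 1) (arr.length : Int) 1).find?
            (fun j => (PySem.List.pyGetD arr j 0 == PySem.List.pyGetD arr i 0 + d)
              || (PySem.List.pyGetD arr j 0 == PySem.List.pyGetD arr i 0 - d)) := by
      rw [find?_or_minOpt (fun j => PySem.List.pyGetD arr j 0 == PySem.List.pyGetD arr i 0 + d)
            (fun j => PySem.List.pyGetD arr j 0 == PySem.List.pyGetD arr i 0 - d) _
            (PySem.List.pairwise_lt_pyRange_one (i + 1) (arr.length : Int))]
      rw [← hdict (PySem.List.pyGetD arr i 0 + d), ← hdict (PySem.List.pyGetD arr i 0 - d)]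
      cases h1 : st'.1.get? (PySem.List.pyGetD arr i 0 + d) with
      | none =>
        cases h2 : st'.1.get? (PySem.List.pyGetD arr i 0 - d) with
        | none => simp [h1, h2, minOpt]
        | some b => simp [h1, h2, minOpt, List.min?]
      | some a =>
        cases h2 : st'.1.get? (PySem.List.pyGetD arr i 0 - d) with
        | none => simp [h1, h2, minOpt, List.min?]
        | some b => simp [h1, h2, minOpt, List.min?]
    -- A's inner loop at i = that first matching index, paired with i
    have hinner : innerF arr d (arr.length : Int) i
        = ((PySem.List.pyRange (i + 1) (arr.length : Int) 1).find?
            (fun j => (PySem.List.pyGetD arr j 0 == PySem.List.pyGetD arr i 0 + d)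
              || (PySem.List.pyGetD arr j 0 == PySem.List.pyGetD arr i 0 - d))).map
            (fun j => (i, j)) := by
      have hpred : (fun j => decide
            (pyAbsInt (PySem.List.pyGetD arr i 0 - PySem.List.pyGetD arr j 0) = d))
          = (fun j => (PySem.List.pyGetD arr j 0 == PySem.List.pyGetD arr i 0 + d)
              || (PySem.List.pyGetD arr j 0 == PySem.List.pyGetD arr i 0 - d)) :=
        funext fun j => abs_cond (PySem.List.pyGetD arr i 0) (PySem.List.pyGetD arr j 0) d hd
      simp only [innerF]
      rw [findSome?_if_eq_find?_map
        (fun j => pyAbsInt (PySem.List.pyGetD arr i 0 - PySem.List.pyGetD arr j 0) = d)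
        (fun j => (i, j))]
      rw [hpred]
    constructor
    · intro w
      show (stepB arr d st' i).1.get? w = _
      simp only [stepB, List.find?_cons]
      rw [PySem.Dict.get?_insert]
      by_cases hw : w = PySem.List.pyGetD arr i 0
      · simp [hw]
      · have hb : (PySem.List.pyGetD arr i 0 == w) = false := by simp [Ne.symm hw]
        simp [hw, hb, hdict w]
    · show (stepB arr d st' i).2 = _
      simp only [stepB, List.findSome?_cons]
      rw [hcand, hinner]
      cases hfo : (PySem.List.pyRange (i + 1) (arr.length : Int) 1).find?
          (fun j => (PySem.List.pyGetD arr j 0 == PySem.List.pyGetD arr i 0 + d)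
            || (PySem.List.pyGetD arr j 0 == PySem.List.pyGetD arr i 0 - d)) with
      | none => simpa using hres
      | some j0 => simp

-- ===== VERDICT (by name: the statement is the Claim_ definition above) =====
theorem questionA_spec : Claim_equal_questionA := by
  intro arr d _
  unfold Spec_questionA questionA questionA_alt
  by_cases hd : d < 0
  · simp [hd]
  · have hd' : 0 ≤ d := by omega
    simp only [hd, if_false]
    have hrev : PySem.List.pyRange (PySem.List.len arr - 1) (-1) (-1)
        = (PySem.List.pyRange 0 (PySem.List.len arr) 1).reverse := by
      have h := PySem.List.pyRange_neg_one_eq_reverse (PySem.List.len arr - 1) (-1)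
      simpa using h
    rw [PySem.List.len_eq] at hrev ⊢
    rw [hrev, List.foldl_reverse]
    have hmain := (invarB arr d hd' ((arr.length : Int) - 0).toNat 0 (by omega) rfl).2
    rw [hmain]
    rfl
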